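-- pv_equiv track=rewrite | github.com/mcxwx123/RecGFI | data/data_preprocess_2.py | count_negative_words
-- ===== SOURCE A (Python) =====
-- def count_negative_words(str):
--     lst=['possible', 'function', 'blob', 'link', 'learn', 'report', 'installed', 'commit', 'case', 'feature', 'oa', 'doc', 'object', 'create']
--     count=0
--     str=str.lower()
--     lst_word=str.split()
--     for i in lst_word:
--         if i in lst:
--             count+=1
--     return count
-- ===== SOURCE B (Python) =====
-- def count_negative_words(str):
--     lst=['possible', 'function', 'blob', 'link', 'learn', 'report', 'installed', 'commit', 'case', 'feature', 'oa', 'doc', 'object', 'create']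
--     counts = {}
--     for w in str.lower().split():
--         counts[w] = counts.get(w, 0) + 1
--     return sum(counts.get(w, 0) for w in lst)
-- ===== Notes on version B (the rewrite author's own statement) =====
-- stated objective: alternative
-- what changed: B builds a frequency table of the document's words in one pass and then loops over the fixed 14-word negative list summing the stored counts, instead of scanning the document words and testing each for membership in the list.
import Mathlib
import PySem

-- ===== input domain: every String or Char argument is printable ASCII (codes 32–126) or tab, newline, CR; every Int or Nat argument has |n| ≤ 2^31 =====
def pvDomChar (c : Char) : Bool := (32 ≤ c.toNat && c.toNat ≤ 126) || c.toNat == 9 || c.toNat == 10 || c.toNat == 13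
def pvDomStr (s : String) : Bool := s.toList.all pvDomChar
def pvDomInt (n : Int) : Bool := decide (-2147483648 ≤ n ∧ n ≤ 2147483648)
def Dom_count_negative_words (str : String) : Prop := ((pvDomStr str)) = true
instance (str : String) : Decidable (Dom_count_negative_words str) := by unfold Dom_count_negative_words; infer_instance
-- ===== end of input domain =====

-- B replaces the membership-test scan over the document's words by a one-pass
-- frequency table plus a loop over the fixed 14-word negative list (alternative decomposition).

-- the fixed negative-word list, a literal shared by both Pythons
def pvNegList : List String :=
  ["possible", "function", "blob", "link", "learn", "report", "installed",
   "commit", "case", "feature", "oa", "doc", "object", "create"]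

-- ===== PORT A =====
-- scan the lowered, split words; bump the counter when a word is in the list
def count_negative_words (str : String) : Int :=
  let lst := pvNegList
  let str := PySem.Str.lower str
  let lst_word := PySem.Str.split₀ str
  lst_word.foldl (fun count i => if i ∈ lst then count + 1 else count) 0

-- ===== PORT B =====
-- build a word-frequency dict in one pass, then sum the counts of the 14 negative words
def count_negative_words_alt (str : String) : Int :=
  let lst := pvNegList
  let counts := (PySem.Str.split₀ (PySem.Str.lower str)).foldl
    (fun d w => d.insert w (d.getD w 0 + 1)) PySem.Dict.empty
  lst.foldl (fun s w => s + counts.getD w 0) 0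

-- ===== PRECONDITION & SPEC =====
def Spec_count_negative_words (str : String) (out : Int) : Prop := out = count_negative_words_alt str
instance (str : String) (out : Int) : Decidable (Spec_count_negative_words str out) := by unfold Spec_count_negative_words; infer_instance

-- ===== CLAIM (what is proved, stated in full; the proofs are below) =====
def Claim_equal_count_negative_words : Prop := ∀ (str : String), Dom_count_negative_words str → Spec_count_negative_words str (count_negative_words str)

-- ===== LEMMAS AND PROOFS =====

-- A's loop counts, from accumulator n, the words belonging to lst
theorem pv_foldl_count (lst : List String) (ws : List String) (n : Int) :
    ws.foldl (fun count i => if i ∈ lst then count + 1 else count) n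
      = n + ((ws.filter (fun i => decide (i ∈ lst))).length : Int) := by
  induction ws generalizing n with
  | nil => simp
  | cons x ws ih =>
    by_cases hx : x ∈ lst
    · simp [hx, ih]; omega
    · simp [hx, ih]

-- summing an indicator over a duplicate-free list
theorem pv_sum_indicator (x : String) (lst : List String) (hn : lst.Nodup) :
    (lst.map (fun w => if x = w then (1 : Int) else 0)).sum
      = if x ∈ lst then 1 else 0 := by
  induction lst with
  | nil => simp
  | cons y lst ih =>
    rcases List.nodup_cons.mp hn with ⟨hy, hn'⟩
    by_cases hxy : x = y
    · subst hxy
      simp only [List.map_cons, List.sum_cons, List.mem_cons, true_or, if_true]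
      have : (lst.map (fun w => if x = w then (1 : Int) else 0)).sum = 0 := by
        have : ∀ w ∈ lst, (if x = w then (1 : Int) else 0) = 0 := by
          intro w hw
          simp [show x ≠ w from fun h => hy (h ▸ hw)]
        calc (lst.map (fun w => if x = w then (1 : Int) else 0)).sum
            = (lst.map (fun _ => (0 : Int))).sum := by
              rw [List.map_congr_left this]
          _ = 0 := by simp
      omega
    · simp only [List.map_cons, List.sum_cons, if_neg hxy, ih hn', List.mem_cons]
      by_cases hx : x ∈ lst <;> simp [hx, hxy]

-- summing per-negative-word counts equals counting in-list words, given lst has no duplicates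
theorem pv_sum_counts (lst : List String) (hn : lst.Nodup) (ws : List String) :
    (lst.map (fun w => (ws.count w : Int))).sum
      = ((ws.filter (fun i => decide (i ∈ lst))).length : Int) := by
  induction ws with
  | nil => simp
  | cons x ws ih =>
    have hsplit : (lst.map (fun w => ((x :: ws).count w : Int))).sum
        = (lst.map (fun w => (ws.count w : Int))).sum
          + (lst.map (fun w => if x = w then (1 : Int) else 0)).sum := by
      rw [← List.sum_map_add]
      apply congrArg List.sum
      apply List.map_congr_left
      intro w _
      by_cases hw : x = w
      · subst hw; simp [List.count_cons_self]
      · rw [List.count_cons_of_ne (by simpa using hw)]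
        simp [hw]
    rw [hsplit, ih, pv_sum_indicator x lst hn]
    by_cases hx : x ∈ lst <;> simp [hx]

-- fold of additions equals the sum of the mapped list
theorem pv_foldl_add (f : String → Int) (lst : List String) (n : Int) :
    lst.foldl (fun s w => s + f w) n = n + (lst.map f).sum := by
  induction lst generalizing n with
  | nil => simp
  | cons x lst ih => simp [ih]; ring

-- ===== VERDICT (by name: the statement is the Claim_ definition above) =====
theorem count_negative_words_spec : Claim_equal_count_negative_words := by
  intro str _
  show count_negative_words str = count_negative_words_alt str
  unfold count_negative_words count_negative_words_alt
  simp only [PySem.Dict.foldl_insert_getD_add_one_eq_counter]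
  rw [pv_foldl_count, pv_foldl_add (fun w => (PySem.Dict.counter (PySem.Str.split₀ (PySem.Str.lower str))).getD w 0)]
  have : ∀ w, (PySem.Dict.counter (PySem.Str.split₀ (PySem.Str.lower str))).getD w 0
      = ((PySem.Str.split₀ (PySem.Str.lower str)).count w : Int) := fun w =>
    PySem.Dict.getD_counter _ _
  rw [List.map_congr_left (fun w _ => this w),
    pv_sum_counts pvNegList (by decide) (PySem.Str.split₀ (PySem.Str.lower str))]
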